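-- pv_equiv track=rewrite | github.com/agniinvestor/LagnaMaster | src/scoring.py | _planet_aspects_house
-- ===== SOURCE A (Python) =====
-- def _planet_aspects_house(planet: str, planet_house: int, target_house: int) -> bool:
--     """Return True if planet in planet_house casts a full aspect to target_house."""
--     def wrap(h):
--         return (h - 1) % 12 + 1
--
--     offsets = [6]  # 7th aspect (all planets)
--     if planet == "Mars":
--         offsets += [3, 7]      # 4th + 8th
--     elif planet == "Jupiter":
--         offsets += [4, 8]      # 5th + 9th
--     elif planet == "Saturn":
--         offsets += [2, 9]      # 3rd + 10th
--     # Rahu/Ketu: 5th+9th aspects per some schools; skip for Parashari base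
--
--     aspected = {wrap(planet_house + o) for o in offsets}
--     return target_house in aspected
-- ===== SOURCE B (Python) =====
-- # Bitmask table: bit o set <=> the planet aspects the house o places ahead of its own.
-- _ASPECT_MASKS = {
--     "Mars":    (1 << 6) | (1 << 3) | (1 << 7),
--     "Jupiter": (1 << 6) | (1 << 4) | (1 << 8),
--     "Saturn":  (1 << 6) | (1 << 2) | (1 << 9),
-- }
--
--
-- def _planet_aspects_house(planet: str, planet_house: int, target_house: int) -> bool:
--     """Return True if planet in planet_house casts a full aspect to target_house."""
--     m = _ASPECT_MASKS.get(planet, 1 << 6)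
--     s = (planet_house - 1) % 12
--     rotated = ((m << s) | (m >> (12 - s))) & 0xFFF
--     return 1 <= target_house <= 12 and bool((rotated >> (target_house - 1)) & 1)
-- ===== Notes on version B (the rewrite author's own statement) =====
-- stated objective: alternative
-- what changed: Replaces the if/elif offset-list building, the wrap helper and the set comprehension with a precomputed per-planet 12-bit aspect bitmask that is rotated by the planet's house position and probed with a single bit test.
import Mathlib
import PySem

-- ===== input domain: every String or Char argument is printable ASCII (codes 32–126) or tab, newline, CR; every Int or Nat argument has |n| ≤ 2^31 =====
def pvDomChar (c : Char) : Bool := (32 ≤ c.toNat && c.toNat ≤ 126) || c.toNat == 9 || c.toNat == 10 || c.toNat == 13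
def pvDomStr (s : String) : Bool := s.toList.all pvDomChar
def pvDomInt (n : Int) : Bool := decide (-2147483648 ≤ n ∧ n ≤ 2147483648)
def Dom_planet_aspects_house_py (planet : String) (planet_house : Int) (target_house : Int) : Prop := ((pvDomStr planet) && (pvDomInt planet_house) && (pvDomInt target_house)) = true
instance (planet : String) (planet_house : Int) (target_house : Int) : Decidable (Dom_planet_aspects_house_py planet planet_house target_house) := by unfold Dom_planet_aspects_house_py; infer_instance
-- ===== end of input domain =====

-- B replaces the offset-list/wrap/set construction with a per-planet 12-bit aspect bitmask,
-- rotated by the planet's house position and probed with one bit test (alternative, same cost).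

-- ===== PORT A =====
-- wrap(h) = (h - 1) % 12 + 1  (Python % with positive divisor = PySem.Int.mod, exact)
def pvWrap (h : Int) : Int := PySem.Int.mod (h - 1) 12 + 1

def planet_aspects_house_py (planet : String) (planet_house : Int) (target_house : Int) : Bool :=
  let offsets : List Int := [6]
  let offsets :=
    if planet = "Mars" then offsets ++ [3, 7]
    else if planet = "Jupiter" then offsets ++ [4, 8]
    else if planet = "Saturn" then offsets ++ [2, 9]
    else offsets
  let aspected : PySem.Set Int := PySem.Set.ofList (offsets.map (fun o => pvWrap (planet_house + o)))
  PySem.Set.contains aspected target_house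

-- ===== PORT B =====
-- _ASPECT_MASKS: bit o set <=> the planet aspects the house o places ahead of its own
def pvAspectMasks : PySem.Dict String Nat :=
  ((PySem.Dict.empty.insert "Mars" 200).insert "Jupiter" 336).insert "Saturn" 580

def planet_aspects_house_py_alt (planet : String) (planet_house : Int) (target_house : Int) : Bool :=
  let m := pvAspectMasks.getD planet 64
  let s := (PySem.Int.mod (planet_house - 1) 12).toNat
  let rotated := ((m <<< s) ||| (m >>> (12 - s))) &&& 0xFFF
  decide (1 ≤ target_house) && decide (target_house ≤ 12)
    && ((((rotated >>> (target_house - 1).toNat) &&& 1) == 1))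

-- ===== PRECONDITION & SPEC =====
def Spec_planet_aspects_house_py (planet : String) (planet_house : Int) (target_house : Int) (out : Bool) : Prop := out = planet_aspects_house_py_alt planet planet_house target_house
instance (planet : String) (planet_house : Int) (target_house : Int) (out : Bool) : Decidable (Spec_planet_aspects_house_py planet planet_house target_house out) := by unfold Spec_planet_aspects_house_py; infer_instance

-- ===== CLAIM =====
def Claim_equal_planet_aspects_house_py : Prop := ∀ (planet : String) (planet_house : Int) (target_house : Int), Dom_planet_aspects_house_py planet planet_house target_house → Spec_planet_aspects_house_py planet planet_house target_house (planet_aspects_house_py planet planet_house target_house)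

-- ===== LEMMAS AND PROOFS =====

-- wrap(ph + o) = t  ⟺  t is a real house and (t - ph) % 12 equals o  (for 0 ≤ o < 12)
theorem pvWrap_eq_iff (ph o t : Int) (h0 : 0 ≤ o) (h1 : o < 12) :
    pvWrap (ph + o) = t ↔ 1 ≤ t ∧ t ≤ 12 ∧ PySem.Int.mod (t - ph) 12 = o := by
  unfold pvWrap
  rw [PySem.Int.mod_eq_emod_of_pos (by norm_num), PySem.Int.mod_eq_emod_of_pos (by norm_num)]
  omega

-- A's set-membership characterised by the inverse modular offset
theorem pv_mem_iff (ph t : Int) (os : List Int)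
    (hos : ∀ o ∈ os, 0 ≤ o ∧ o < 12) :
    (PySem.Set.contains (PySem.Set.ofList (os.map (fun o => pvWrap (ph + o)))) t = true) ↔
      (1 ≤ t ∧ t ≤ 12) ∧ PySem.Int.mod (t - ph) 12 ∈ os := by
  rw [PySem.Set.contains_iff, PySem.Set.mem_ofList, List.mem_map]
  constructor
  · rintro ⟨o, ho, heq⟩
    obtain ⟨h0, h1⟩ := hos o ho
    obtain ⟨ht1, ht2, hd⟩ := (pvWrap_eq_iff ph o t h0 h1).mp heq
    exact ⟨⟨ht1, ht2⟩, hd ▸ ho⟩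
  · rintro ⟨⟨ht1, ht2⟩, hmem⟩
    refine ⟨PySem.Int.mod (t - ph) 12, hmem, ?_⟩
    obtain ⟨h0, h1⟩ := hos _ hmem
    exact (pvWrap_eq_iff ph _ t h0 h1).mpr ⟨ht1, ht2, rfl⟩

-- the rotated-mask bit test, evaluated for each of the four concrete masks
theorem pvBit200 : ∀ s < 12, ∀ p < 12,
    (((((((200 : Nat) <<< s) ||| (200 >>> (12 - s))) &&& 0xFFF) >>> p) &&& 1) == 1) =
      decide ((p + 12 - s) % 12 ∈ ([6, 3, 7] : List Nat)) := by decide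

theorem pvBit336 : ∀ s < 12, ∀ p < 12,
    (((((((336 : Nat) <<< s) ||| (336 >>> (12 - s))) &&& 0xFFF) >>> p) &&& 1) == 1) =
      decide ((p + 12 - s) % 12 ∈ ([6, 4, 8] : List Nat)) := by decide

theorem pvBit580 : ∀ s < 12, ∀ p < 12,
    (((((((580 : Nat) <<< s) ||| (580 >>> (12 - s))) &&& 0xFFF) >>> p) &&& 1) == 1) =
      decide ((p + 12 - s) % 12 ∈ ([6, 2, 9] : List Nat)) := by decide

theorem pvBit64 : ∀ s < 12, ∀ p < 12,
    (((((((64 : Nat) <<< s) ||| (64 >>> (12 - s))) &&& 0xFFF) >>> p) &&& 1) == 1) =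
      decide ((p + 12 - s) % 12 ∈ ([6] : List Nat)) := by decide

-- one branch of the main proof: mask m and offset list offs matching via pvBit
theorem pv_branch (ph t : Int) (m : Nat) (offsI : List Int) (offsN : List Nat)
    (hcast : ∀ d : Int, 0 ≤ d → d < 12 → (d ∈ offsI ↔ d.toNat ∈ offsN))
    (hos : ∀ o ∈ offsI, 0 ≤ o ∧ o < 12)
    (hbit : ∀ s < 12, ∀ p < 12,
      ((((((m <<< s) ||| (m >>> (12 - s))) &&& 0xFFF) >>> p) &&& 1) == 1) =
        decide ((p + 12 - s) % 12 ∈ offsN)) :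
    PySem.Set.contains (PySem.Set.ofList (offsI.map (fun o => pvWrap (ph + o)))) t =
      (decide (1 ≤ t) && decide (t ≤ 12)
        && ((((((m <<< (PySem.Int.mod (ph - 1) 12).toNat)
              ||| (m >>> (12 - (PySem.Int.mod (ph - 1) 12).toNat))) &&& 0xFFF)
              >>> (t - 1).toNat) &&& 1) == 1)) := by
  have hmod : PySem.Int.mod (ph - 1) 12 = (ph - 1) % 12 :=
    PySem.Int.mod_eq_emod_of_pos (by norm_num)
  have hs : (PySem.Int.mod (ph - 1) 12).toNat < 12 := by
    rw [hmod]; omega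
  by_cases h1 : 1 ≤ t ∧ t ≤ 12
  · have hp : (t - 1).toNat < 12 := by omega
    rw [hbit _ hs _ hp]
    rw [Bool.eq_iff_iff, pv_mem_iff ph t offsI hos]
    have hd0 : (0:Int) ≤ PySem.Int.mod (t - ph) 12 := by
      rw [PySem.Int.mod_eq_emod_of_pos (by norm_num)]; omega
    have hd1 : PySem.Int.mod (t - ph) 12 < 12 := by
      rw [PySem.Int.mod_eq_emod_of_pos (by norm_num)]; omega
    rw [hcast _ hd0 hd1]
    have key : (PySem.Int.mod (t - ph) 12).toNat =
        ((t - 1).toNat + 12 - (PySem.Int.mod (ph - 1) 12).toNat) % 12 := by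
      rw [PySem.Int.mod_eq_emod_of_pos (by norm_num), hmod]
      omega
    rw [key]
    simp [h1]
  · have : (decide (1 ≤ t) && decide (t ≤ 12)) = false := by
      rcases not_and_or.mp h1 with h | h <;> simp [h]
    rw [this, Bool.false_and, Bool.eq_iff_iff, pv_mem_iff ph t offsI hos]
    simp [h1]

-- ===== VERDICT =====
theorem planet_aspects_house_py_spec : Claim_equal_planet_aspects_house_py := by
  intro planet ph t _
  unfold Spec_planet_aspects_house_py planet_aspects_house_py planet_aspects_house_py_alt
  dsimp only
  by_cases hM : planet = "Mars"
  · simp only [hM, if_true, pvAspectMasks, PySem.Dict.getD_insert, if_neg (by decide : ("Mars":String) ≠ "Saturn"), if_neg (by decide : ("Mars":String) ≠ "Jupiter")]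
    exact pv_branch ph t 200 [6,3,7] [6,3,7]
      (by intro d h0 h1; simp; omega)
      (by intro o ho; fin_cases ho <;> omega) pvBit200
  · by_cases hJ : planet = "Jupiter"
    · simp only [hJ, if_true, pvAspectMasks, PySem.Dict.getD_insert, if_neg (by decide : ("Jupiter":String) ≠ "Saturn")]
      exact pv_branch ph t 336 [6,4,8] [6,4,8]
        (by intro d h0 h1; simp; omega)
        (by intro o ho; fin_cases ho <;> omega) pvBit336
    · by_cases hS : planet = "Saturn"
      · simp only [hS, if_true, pvAspectMasks, PySem.Dict.getD_insert]
        exact pv_branch ph t 580 [6,2,9] [6,2,9]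
          (by intro d h0 h1; simp; omega)
          (by intro o ho; fin_cases ho <;> omega) pvBit580
      · simp only [hM, hJ, hS, if_false, pvAspectMasks, PySem.Dict.getD_insert, PySem.Dict.getD_empty]
        exact pv_branch ph t 64 [6] [6]
          (by intro d h0 h1; simp; omega)
          (by intro o ho; fin_cases ho <;> omega) pvBit64
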